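-- pv_equiv track=rewrite | github.com/DJDevon3/Classic_Cryptography | Progressive_Caesar_Matrix/Progressive_Caesar_Matrix.py | pure_progressive_caesar
-- ===== SOURCE A (Python) =====
-- def pure_progressive_caesar(text, alphabet, start_shift):
--     """Pure progressive Caesar: shift sequence = start, start-1, start-2, ..."""
--     alphabet = alphabet.upper()
--     text = text.upper()
--
--     L = len(alphabet)
--     result = ""
--
--     progressive_shift = start_shift  # first shift
--     decrement = 0                    # how much to subtract each step
--
--     for char in text:
--         if char in alphabet:
--             idx = alphabet.index(char)
--             total_shift = progressive_shift - decrement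
--             decoded = alphabet[(idx - total_shift) % L]
--             result += decoded
--             decrement += 1
--         else:
--             result += char
--
--     return result
-- ===== SOURCE B (Python) =====
-- def pure_progressive_caesar(text, alphabet, start_shift):
--     """Two-pass decode: extract the alphabet letters, decode them by position,
--     then reinsert them among the untouched characters."""
--     alphabet = alphabet.upper()
--     text = text.upper()
--     L = len(alphabet)
--     letters = [c for c in text if c in alphabet]
--     decoded = [alphabet[(alphabet.index(c) + i - start_shift) % L]
--                for i, c in enumerate(letters)]
--     it = iter(decoded)
--     return "".join(next(it) if c in alphabet else c for c in text)
-- ===== Notes on version B (the rewrite author's own statement) =====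
-- stated objective: alternative
-- what changed: Replaces A's single fused loop with a running decrement counter by a two-pass decomposition: extract the alphabet letters, decode them positionally via enumerate (alphabet[(idx + i - start_shift) % L]), then reinsert them among the unchanged characters with an iterator.
import Mathlib
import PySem

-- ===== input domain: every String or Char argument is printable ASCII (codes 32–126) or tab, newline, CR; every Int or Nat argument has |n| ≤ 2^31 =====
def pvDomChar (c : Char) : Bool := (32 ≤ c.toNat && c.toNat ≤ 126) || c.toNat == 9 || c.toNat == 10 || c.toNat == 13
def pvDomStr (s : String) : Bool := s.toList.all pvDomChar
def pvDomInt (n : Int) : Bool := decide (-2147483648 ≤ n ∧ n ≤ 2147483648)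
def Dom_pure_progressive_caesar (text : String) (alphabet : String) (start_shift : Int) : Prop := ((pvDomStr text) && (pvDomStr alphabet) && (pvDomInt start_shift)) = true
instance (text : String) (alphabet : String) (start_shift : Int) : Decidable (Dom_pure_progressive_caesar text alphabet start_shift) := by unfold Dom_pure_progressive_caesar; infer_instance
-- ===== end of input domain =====

-- B replaces A's fused loop-with-running-counter by an extract/decode-by-position/reinsert
-- two-pass decomposition (objective: alternative decomposition, same cost).

-- ===== PORT A =====
-- 'char in alphabet' for a single char is char-membership; 'alphabet.index(char)' for a single
-- present char is the first index of that char: both ported exactly via List membership / index?.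
-- The .getD defaults are never taken: char ∈ alph and 0 ≤ mod … < L there.
def pure_progressive_caesar (text : String) (alphabet : String) (start_shift : Int) : String :=
  let alph := PySem.Chars.upper alphabet.toList
  let txt := PySem.Chars.upper text.toList
  let L : Int := (alph.length : Int)
  let fin := txt.foldl (fun (st : List Char × Int) char =>
    if char ∈ alph then
      let idx : Int := ((PySem.List.index? alph char).getD 0 : Nat)
      let total_shift := start_shift - st.2
      let decoded := (PySem.List.pyGet? alph (PySem.Int.mod (idx - total_shift) L)).getD char
      (st.1 ++ [decoded], st.2 + 1)
    else
      (st.1 ++ [char], st.2)) ([], 0)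
  String.mk fin.1

-- ===== PORT B =====
-- decode of the i-th extracted letter (Source B's comprehension body); .getD defaults never taken.
def pvDecode (alph : List Char) (L : Int) (start_shift : Int) (p : Int × Char) : Char :=
  (PySem.List.pyGet? alph
    (PySem.Int.mod ((((PySem.List.index? alph p.2).getD 0 : Nat) : Int) + p.1 - start_shift) L)).getD p.2

-- Source B's final join: copy non-alphabet chars, consume the next decoded letter otherwise
-- (the [] branch is unreachable: decoded has one letter per alphabet char of txt).
def pvReassemble (alph : List Char) : List Char → List Char → List Char
  | [], _ => []
  | c :: cs, ds =>
    if c ∈ alph then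
      match ds with
      | d :: ds' => d :: pvReassemble alph cs ds'
      | [] => c :: pvReassemble alph cs []
    else c :: pvReassemble alph cs ds

def pure_progressive_caesar_alt (text : String) (alphabet : String) (start_shift : Int) : String :=
  let alph := PySem.Chars.upper alphabet.toList
  let txt := PySem.Chars.upper text.toList
  let L : Int := (alph.length : Int)
  let letters := txt.filter (fun c => decide (c ∈ alph))
  let decoded := (PySem.List.enumerate letters 0).map (pvDecode alph L start_shift)
  String.mk (pvReassemble alph txt decoded)

-- ===== PRECONDITION & SPEC =====
def Spec_pure_progressive_caesar (text : String) (alphabet : String) (start_shift : Int) (out : String) : Prop := out = pure_progressive_caesar_alt text alphabet start_shift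
instance (text : String) (alphabet : String) (start_shift : Int) (out : String) : Decidable (Spec_pure_progressive_caesar text alphabet start_shift out) := by unfold Spec_pure_progressive_caesar; infer_instance

-- ===== CLAIM (what is proved, stated in full; the proofs are below) =====
def Claim_equal_pure_progressive_caesar : Prop := ∀ (text : String) (alphabet : String) (start_shift : Int), Dom_pure_progressive_caesar text alphabet start_shift → Spec_pure_progressive_caesar text alphabet start_shift (pure_progressive_caesar text alphabet start_shift)

-- ===== LEMMAS AND PROOFS =====

-- ===== VERDICT (by name: the statement is the Claim_ definition above) =====
-- A's fold, started at any accumulator/decrement, produces the reassembly of the letters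
-- decoded from position 'dec' on.
theorem pvFold_eq (alph : List Char) (L s : Int) :
    ∀ (txt : List Char) (acc : List Char) (dec : Int),
      (txt.foldl (fun (st : List Char × Int) char =>
        if char ∈ alph then
          let idx : Int := ((PySem.List.index? alph char).getD 0 : Nat)
          let total_shift := s - st.2
          let decoded := (PySem.List.pyGet? alph (PySem.Int.mod (idx - total_shift) L)).getD char
          (st.1 ++ [decoded], st.2 + 1)
        else
          (st.1 ++ [char], st.2)) (acc, dec)).1
      = acc ++ pvReassemble alph txt
          ((PySem.List.enumerate (txt.filter (fun c => decide (c ∈ alph))) dec).map (pvDecode alph L s)) := by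
  intro txt
  induction txt with
  | nil => intro acc dec; simp [pvReassemble]
  | cons c cs ih =>
    intro acc dec
    by_cases hc : c ∈ alph
    · simp only [List.foldl_cons, List.filter_cons, hc, decide_true,
        PySem.List.enumerate, pvReassemble, ih]
      have harg : ∀ i : Int, i - (s - dec) = i + dec - s := fun i => by ring
      simp [pvDecode, harg, List.append_assoc]
    · simp only [List.foldl_cons, List.filter_cons, hc, decide_false,
        pvReassemble, ih]
      simp [List.append_assoc]

theorem pure_progressive_caesar_spec : Claim_equal_pure_progressive_caesar := by
  intro text alphabet start_shift _
  show _ = _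
  unfold pure_progressive_caesar pure_progressive_caesar_alt
  simp only []
  rw [pvFold_eq]
  simp
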